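-- pv_equiv track=rewrite | github.com/bradenripple5/graycode-reader | pattern_generation.py | build_rings
-- ===== SOURCE A (Python) =====
-- def gray_code(value: int) -> int:
--     return value ^ (value >> 1)
--
-- def build_rings(sections: int, order: str) -> list[list[int]]:
--     columns = 1 << sections
--     rings = [[] for _ in range(sections)]
--
--     for col in range(columns):
--         code = gray_code(col) if order == "gray" else col
--         for bit in range(sections):
--             # Ring 0 is MSB (inner), last ring is LSB (outer).
--             ring_idx = bit
--             bit_idx = sections - 1 - bit
--             rings[ring_idx].append((code >> bit_idx) & 1)
--
--     return rings
-- ===== SOURCE B (Python) =====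
-- def build_rings(sections: int, order: str) -> list[list[int]]:
--     # Ring-major: each ring is one comprehension from a closed-form per-column formula;
--     # gray bit b of c is ((c >> b) + 1 >> 1) & 1, so no per-column gray/bit extraction
--     # into shared per-ring accumulators is needed.
--     columns = 1 << sections
--     rings = []
--     for r in range(sections):
--         b = sections - 1 - r
--         if order == "gray":
--             rings.append([((c >> b) + 1 >> 1) & 1 for c in range(columns)])
--         else:
--             rings.append([(c >> b) & 1 for c in range(columns)])
--     return rings
-- ===== Notes on version B (the rewrite author's own statement) =====
-- stated objective: alternative
-- what changed: A fills all rings in parallel by a column-major nested loop that computes gray_code(col) and extracts one bit per (column, ring) pair; B builds each ring independently, ring-major, as a single comprehension from a closed-form periodic formula (((c >> b) + 1) >> 1) & 1 for gray, (c >> b) & 1 for binary, with no gray_code/XOR step and no shared accumulators.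
import Mathlib
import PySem

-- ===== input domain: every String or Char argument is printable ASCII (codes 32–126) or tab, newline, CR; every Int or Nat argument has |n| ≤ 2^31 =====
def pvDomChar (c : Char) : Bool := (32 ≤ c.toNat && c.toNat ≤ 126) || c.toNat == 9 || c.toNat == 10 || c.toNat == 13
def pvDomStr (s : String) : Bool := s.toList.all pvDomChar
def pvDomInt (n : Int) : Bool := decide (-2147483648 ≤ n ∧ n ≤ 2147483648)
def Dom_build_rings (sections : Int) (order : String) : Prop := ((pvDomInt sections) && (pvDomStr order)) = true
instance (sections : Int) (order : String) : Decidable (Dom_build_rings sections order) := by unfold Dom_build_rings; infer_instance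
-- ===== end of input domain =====

-- B builds each ring independently, ring-major, from a closed-form per-column formula
-- (no gray_code/XOR, no shared per-ring accumulators), instead of A's column-major
-- nested loop extracting one bit per (column, ring) pair.

-- ===== PORT A =====
def gray_code (value : Int) : Int := PySem.Int.bxor value (value >>> (1 : Nat))

def build_rings (sections : Int) (order : String) : List (List Int) :=
  -- Python's '1 << sections' raises for sections < 0; Pre_ excludes that, so .toNat is exact.
  -- The rings state is an Array of Arrays: the exact counterpart of Python's list of lists
  -- (O(1) indexed update and append, as in CPython); converted to lists at the return.
  let columns : Nat := 1 <<< sections.toNat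
  let rings0 : Array (Array Int) := Array.replicate sections.toNat #[]
  (((List.range columns).foldl (fun rings col =>
    let code : Int := if order == "gray" then gray_code (Int.ofNat col) else Int.ofNat col
    (List.range sections.toNat).foldl (fun rs bit =>
      -- bit < sections inside the loop, so bit_idx ≥ 0 and Nat subtraction is exact
      let bit_idx : Nat := sections.toNat - 1 - bit
      rs.modify bit (fun ring => ring.push (PySem.Int.band (code >>> bit_idx) 1))) rings)
    rings0).toList).map Array.toList

-- ===== PORT B =====
def build_rings_alt (sections : Int) (order : String) : List (List Int) :=
  -- Python's '1 << sections' raises for sections < 0; Pre_ excludes that, so .toNat is exact.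
  let columns : Nat := 1 <<< sections.toNat
  (List.range sections.toNat).foldl (fun rings r =>
    let b : Nat := sections.toNat - 1 - r
    let ring : List Int :=
      if order == "gray" then
        (List.range columns).map (fun c => PySem.Int.band (((Int.ofNat c >>> b) + 1) >>> (1 : Nat)) 1)
      else
        (List.range columns).map (fun c => PySem.Int.band (Int.ofNat c >>> b) 1)
    rings ++ [ring]) []

-- ===== PRECONDITION & SPEC =====
-- Python A raises ValueError ('negative shift count') for sections < 0; Pre_ excludes exactly that.
def Pre_build_rings (sections : Int) (order : String) : Prop := 0 ≤ sections
instance (sections : Int) (order : String) : Decidable (Pre_build_rings sections order) := by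
  unfold Pre_build_rings; infer_instance

def pvWitness_build_rings : Int × String := (3, "gray")

def Spec_build_rings (sections : Int) (order : String) (out : List (List Int)) : Prop := out = build_rings_alt sections order
instance (sections : Int) (order : String) (out : List (List Int)) : Decidable (Spec_build_rings sections order out) := by unfold Spec_build_rings; infer_instance

-- ===== CLAIM (what is proved, stated in full; the proofs are below) =====
def Claim_equal_build_rings : Prop := ∀ (sections : Int) (order : String), Dom_build_rings sections order → Pre_build_rings sections order → Spec_build_rings sections order (build_rings sections order)

-- ===== LEMMAS AND PROOFS =====

-- the bit A appends for ring with bit-index b at column c (as a Nat computation)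
def bitA (g : Bool) (b c : Nat) : Int :=
  Int.ofNat (((if g then c ^^^ (c >>> 1) else c) >>> b) &&& 1)

theorem bitA_div (g : Bool) (b c : Nat) :
    bitA g b c = Int.ofNat (if g then ((c / 2^b) % 2) ^^^ ((c / 2^b / 2) % 2) else (c / 2^b) % 2) := by
  rcases g with _ | _
  · simp [bitA, Nat.shiftRight_eq_div_pow, Nat.and_one_is_mod]
  · simp only [bitA, if_true]
    rw [Nat.shiftRight_xor_distrib, Nat.and_xor_distrib_right]
    have h1 : c >>> 1 >>> b = c >>> (b+1) := by
      rw [Nat.shiftRight_eq_div_pow, Nat.shiftRight_eq_div_pow, Nat.shiftRight_eq_div_pow,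
          Nat.div_div_eq_div_mul, pow_succ]
      ring_nf
    rw [h1]
    simp [Nat.shiftRight_eq_div_pow, Nat.and_one_is_mod, pow_succ, ← Nat.div_div_eq_div_mul]

-- A's appended value equals bitA (bridge from Int ops to Nat ops)
theorem band_shift_cast (g : Bool) (col b : Nat) :
    PySem.Int.band ((if g then gray_code (Int.ofNat col) else Int.ofNat col) >>> b) 1
      = bitA g b col := by
  have hone : (1 : Int) = ((1 : Nat) : Int) := rfl
  rcases g with _ | _
  · simp only [gray_code, bitA, Bool.false_eq_true, if_false, Int.ofNat_eq_natCast]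
    rw [← Int.natCast_shiftRight, hone, PySem.Int.band_natCast]
  · simp only [gray_code, bitA, if_true, Int.ofNat_eq_natCast]
    rw [← Int.natCast_shiftRight, PySem.Int.bxor_natCast, ← Int.natCast_shiftRight,
        hone, PySem.Int.band_natCast]

-- one inner pass (over all ring indices) = pointwise append, for a state of full length
theorem inner_fold (v : Nat → Int) (m : Nat) (rs : List (List Int)) (h : m ≤ rs.length) :
    (List.range m).foldl (fun rs bit => rs.set bit ((rs.getD bit []) ++ [v bit])) rs
      = rs.mapIdx (fun i x => if i < m then x ++ [v i] else x) := by
  induction m with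
  | zero =>
    simp only [List.range_zero, List.foldl_nil]
    refine (List.ext_getElem (by simp) ?_).symm
    intro i h1 h2
    simp [List.getElem_mapIdx]
  | succ m ih =>
    rw [List.range_succ, List.foldl_append, ih (by omega), List.foldl_cons, List.foldl_nil]
    have hm : m < (rs.mapIdx fun i x => if i < m then x ++ [v i] else x).length := by
      simp only [List.length_mapIdx]; omega
    have hgd : (List.mapIdx (fun i x => if i < m then x ++ [v i] else x) rs).getD m []
        = rs[m]'(by omega) := by
      rw [List.getD_eq_getElem _ _ hm, List.getElem_mapIdx]
      simp
    rw [hgd]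
    refine List.ext_getElem (by simp) ?_
    intro i h1 h2
    rw [List.getElem_set]
    by_cases hi : m = i
    · subst hi
      rw [List.getElem_mapIdx]
      simp
    · simp only [List.getElem_mapIdx]
      rw [if_neg hi]
      have h3 : i < m ↔ i < m + 1 := by omega
      simp only [h3]

-- the full outer fold of port A, by induction on the column list
theorem outerA (g : Bool) (n : Nat) (cols : List Nat) (rs : List (List Int)) (h : rs.length = n) :
    cols.foldl (fun rings col =>
        (List.range n).foldl (fun rs bit =>
          rs.set bit ((rs.getD bit []) ++ [bitA g (n - 1 - bit) col])) rings) rs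
      = rs.mapIdx (fun i x => x ++ cols.map (fun c => bitA g (n - 1 - i) c)) := by
  induction cols generalizing rs with
  | nil =>
    simp only [List.foldl_nil, List.map_nil, List.append_nil]
    refine (List.ext_getElem (by simp) ?_).symm
    intro i h1 h2
    simp [List.getElem_mapIdx]
  | cons c cs ih =>
    rw [List.foldl_cons, inner_fold _ n rs (by omega)]
    have hlen : (rs.mapIdx fun i x => if i < n then x ++ [bitA g (n - 1 - i) c] else x).length = n := by
      simp [List.length_mapIdx, h]
    rw [ih _ hlen, List.mapIdx_mapIdx]
    refine List.ext_getElem (by simp) ?_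
    intro i h1 h2
    simp only [List.getElem_mapIdx, Function.comp]
    have h3 : i < n := by
      have : i < rs.length := by simpa using h2
      omega
    rw [if_pos h3]
    simp

-- Array state ↔ list state: one inner update
theorem arr_step (rs : Array (Array Int)) (bit : Nat) (x : Int) :
    (((rs.modify bit (fun ring => ring.push x)).toList).map Array.toList)
      = ((rs.toList.map Array.toList).set bit (((rs.toList.map Array.toList).getD bit []) ++ [x])) := by
  rw [Array.toList_modify]
  refine List.ext_getElem (by simp) ?_
  intro i h1 h2
  rw [List.getElem_map, List.getElem_modify, List.getElem_set]
  by_cases h : bit = i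
  · subst h
    rw [if_pos rfl, if_pos rfl, Array.toList_push]
    congr 1
    have hlt : bit < rs.toList.length := by simpa using h1
    rw [List.getD_eq_getElem _ _ (by simpa using hlt), List.getElem_map]
  · rw [if_neg h, if_neg h, List.getElem_map]

-- Array state ↔ list state: the inner fold
theorem arr_fold (v : Nat → Int) (bits : List Nat) (rs : Array (Array Int)) :
    (((bits.foldl (fun rs bit => rs.modify bit (fun ring => ring.push (v bit))) rs).toList).map Array.toList)
      = bits.foldl (fun rs bit => rs.set bit ((rs.getD bit []) ++ [v bit])) (rs.toList.map Array.toList) := by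
  induction bits generalizing rs with
  | nil => simp
  | cons b bs ih => rw [List.foldl_cons, List.foldl_cons, ih, arr_step]

-- Array state ↔ list state: the whole double fold
theorem arr_outer (w : Nat → Nat → Int) (n : Nat) (cols : List Nat) (rs : Array (Array Int)) :
    (((cols.foldl (fun rings col => (List.range n).foldl (fun rs bit =>
        rs.modify bit (fun ring => ring.push (w col bit))) rings) rs).toList).map Array.toList)
      = cols.foldl (fun rings col => (List.range n).foldl (fun rs bit =>
          rs.set bit ((rs.getD bit []) ++ [w col bit])) rings) (rs.toList.map Array.toList) := by
  induction cols generalizing rs with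
  | nil => simp
  | cons c cs ih => rw [List.foldl_cons, List.foldl_cons, ih, arr_fold (w c)]

-- characterization of port A
theorem A_char (sections : Int) (order : String) :
    build_rings sections order
      = (List.range sections.toNat).map (fun r =>
          (List.range (2 ^ sections.toNat)).map
            (fun c => bitA (order == "gray") (sections.toNat - 1 - r) c)) := by
  unfold build_rings
  simp only [Nat.one_shiftLeft]
  rw [arr_outer (fun col bit =>
        PySem.Int.band ((if order == "gray" then gray_code (Int.ofNat col) else Int.ofNat col) >>>
          (sections.toNat - 1 - bit)) 1) sections.toNat]
  rw [Array.toList_replicate, List.map_replicate]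
  have hbody : ∀ (rings : List (List Int)) (col : Nat),
      ((List.range sections.toNat).foldl (fun rs bit =>
        rs.set bit ((rs.getD bit []) ++
          [PySem.Int.band ((if order == "gray" then gray_code (Int.ofNat col) else Int.ofNat col) >>>
            (sections.toNat - 1 - bit)) 1])) rings)
      = ((List.range sections.toNat).foldl (fun rs bit =>
        rs.set bit ((rs.getD bit []) ++
          [bitA (order == "gray") (sections.toNat - 1 - bit) col])) rings) := by
    intro rings col
    simp only [band_shift_cast]
  simp only [hbody]
  rw [outerA (order == "gray") sections.toNat (List.range (2 ^ sections.toNat))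
       (List.replicate sections.toNat ([] : List Int)) (by simp)]
  refine List.ext_getElem (by simp) ?_
  intro i h1 h2
  simp [List.getElem_mapIdx]

-- append-fold = map
theorem foldl_append_map {A B : Type} (h : A → B) (l : List A) (acc : List B) :
    l.foldl (fun a x => a ++ [h x]) acc = acc ++ l.map h := by
  induction l generalizing acc with
  | nil => simp
  | cons y ys ih => simp [List.foldl_cons, ih]

theorem bitA_true (b c : Nat) : bitA true b c
    = Int.ofNat (((c / 2^b) % 2) ^^^ ((c / 2^b / 2) % 2)) := by
  simpa using bitA_div true b c

-- the closed form of the gray bit: ((q+1)/2) mod 2 = q_0 xor q_1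
theorem gray_closed (q : Nat) : ((q+1)/2) % 2 = (q % 2) ^^^ (q / 2 % 2) := by
  have h1 : (q+1)/2 % 2 = ((q%4)+1)/2 % 2 := by omega
  have h2 : q % 2 = (q%4) % 2 := by omega
  have h3 : q / 2 % 2 = (q%4)/2 % 2 := by omega
  rw [h1, h2, h3]
  have h4 : q % 4 < 4 := by omega
  interval_cases h : (q % 4) <;> rfl

-- B's closed-form element equals A's extracted bit, binary order
theorem elem_false (b c : Nat) :
    PySem.Int.band (Int.ofNat c >>> b) 1 = bitA false b c := by
  simpa using band_shift_cast false c b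

-- B's closed-form element equals A's extracted bit, gray order
theorem elem_true (b c : Nat) :
    PySem.Int.band (((Int.ofNat c >>> b) + 1) >>> (1 : Nat)) 1 = bitA true b c := by
  have hone : (1 : Int) = ((1 : Nat) : Int) := rfl
  rw [bitA_true]
  simp only [Int.ofNat_eq_natCast]
  rw [← Int.natCast_shiftRight, show ((((c >>> b) : Nat) : Int) + 1) = (((c >>> b) + 1 : Nat) : Int) by push_cast; ring,
      ← Int.natCast_shiftRight, hone, PySem.Int.band_natCast]
  congr 1
  simp only [Nat.shiftRight_eq_div_pow, Nat.and_one_is_mod, pow_one]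
  exact gray_closed (c / 2^b)

-- characterization of port B
theorem B_char (sections : Int) (order : String) :
    build_rings_alt sections order
      = (List.range sections.toNat).map (fun r =>
          (List.range (2 ^ sections.toNat)).map
            (fun c => bitA (order == "gray") (sections.toNat - 1 - r) c)) := by
  unfold build_rings_alt
  simp only [Nat.one_shiftLeft]
  rw [foldl_append_map (fun r =>
        if order == "gray" then
          (List.range (2 ^ sections.toNat)).map (fun c =>
            PySem.Int.band (((Int.ofNat c >>> (sections.toNat - 1 - r)) + 1) >>> (1 : Nat)) 1)
        else
          (List.range (2 ^ sections.toNat)).map (fun c =>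
            PySem.Int.band (Int.ofNat c >>> (sections.toNat - 1 - r)) 1))]
  simp only [List.nil_append]
  refine List.ext_getElem (by simp) ?_
  intro i h1 h2
  simp only [List.getElem_map, List.getElem_range]
  rcases hg : order == "gray" with _ | _
  · simp only [Bool.false_eq_true, if_false]
    exact List.map_congr_left (fun c _ => elem_false _ c)
  · simp only [if_true]
    exact List.map_congr_left (fun c _ => elem_true _ c)

-- ===== VERDICT (by name: the statement is the Claim_ definition above) =====
theorem build_rings_spec : Claim_equal_build_rings := by
  intro sections order _ _
  unfold Spec_build_rings
  rw [A_char, B_char]
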